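-- pv_equiv track=rewrite | github.com/alu-/advent-of-code-2019 | day2_part2.py | set_instruction_value_at_address
-- ===== SOURCE A (Python) =====
-- def set_instruction_value_at_address(instructions, value, address):
--     address_counter = 0
--     for line_index, instruction in enumerate(instructions):
--         for position_index, _ in enumerate(instruction):
--             if address_counter == address:
--                 instructions[line_index][position_index] = value
--                 return instructions
--             address_counter += 1
--
--     return instructions
-- ===== SOURCE B (Python) =====
-- def set_instruction_value_at_address(instructions, value, address):
--     for instruction in instructions:
--         if 0 <= address < len(instruction):
--             instruction[address] = value
--             return instructions
--         address -= len(instruction)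
--     return instructions
-- ===== Notes on version B (the rewrite author's own statement) =====
-- stated objective: simpler
-- what changed: B loops over lines only, subtracting each line's length from the address, instead of A's per-position nested loops with a flat counter.
import Mathlib
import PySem

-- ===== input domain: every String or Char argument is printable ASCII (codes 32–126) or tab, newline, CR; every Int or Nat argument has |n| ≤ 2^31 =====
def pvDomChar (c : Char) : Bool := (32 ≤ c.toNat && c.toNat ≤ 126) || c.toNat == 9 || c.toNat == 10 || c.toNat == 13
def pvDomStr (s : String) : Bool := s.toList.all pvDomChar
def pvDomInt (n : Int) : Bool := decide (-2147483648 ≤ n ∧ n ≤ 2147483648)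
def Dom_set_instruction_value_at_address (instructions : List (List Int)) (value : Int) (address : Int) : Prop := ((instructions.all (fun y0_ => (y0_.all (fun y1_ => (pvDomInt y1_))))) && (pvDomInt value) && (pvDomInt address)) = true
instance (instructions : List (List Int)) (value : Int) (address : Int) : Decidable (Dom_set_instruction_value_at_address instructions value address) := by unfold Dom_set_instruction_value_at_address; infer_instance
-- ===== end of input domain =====

-- B replaces A's per-position flat counter with a per-line length subtraction (simpler);
-- both Pythons mutate `instructions` in place identically, the theorems are about the return value.

-- ===== PORT A =====
-- inner loop: scan one instruction, position by position, incrementing the counter;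
-- returns the position index at which the counter hits the address, if any
def pvAInner (instr : List Int) (counter address : Int) : Option Nat :=
  match instr with
  | [] => none
  | _ :: rest =>
    if counter == address then some 0
    else (pvAInner rest (counter + 1) address).map (· + 1)

-- outer loop: line by line; on a hit, set that position in that line and return;
-- otherwise the counter has advanced by the line's length
def pvAOuter (lines : List (List Int)) (counter address value : Int) : List (List Int) :=
  match lines with
  | [] => []
  | l :: rest =>
    match pvAInner l counter address with
    | some p => l.set p value :: rest
    | none => l :: pvAOuter rest (counter + l.length) address value

def set_instruction_value_at_address (instructions : List (List Int)) (value : Int) (address : Int) : List (List Int) :=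
  pvAOuter instructions 0 address value

-- ===== PORT B =====
def set_instruction_value_at_address_alt (instructions : List (List Int)) (value : Int) (address : Int) : List (List Int) :=
  match instructions with
  | [] => []
  | l :: rest =>
    if 0 ≤ address ∧ address < l.length then l.set address.toNat value :: rest
    else l :: set_instruction_value_at_address_alt rest value (address - l.length)

-- ===== PRECONDITION & SPEC =====
def Spec_set_instruction_value_at_address (instructions : List (List Int)) (value : Int) (address : Int) (out : List (List Int)) : Prop := out = set_instruction_value_at_address_alt instructions value address
instance (instructions : List (List Int)) (value : Int) (address : Int) (out : List (List Int)) : Decidable (Spec_set_instruction_value_at_address instructions value address out) := by unfold Spec_set_instruction_value_at_address; infer_instance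

-- ===== CLAIM (what is proved, stated in full; the proofs are below) =====
def Claim_equal_set_instruction_value_at_address : Prop := ∀ (instructions : List (List Int)) (value : Int) (address : Int), Dom_set_instruction_value_at_address instructions value address → Spec_set_instruction_value_at_address instructions value address (set_instruction_value_at_address instructions value address)

-- ===== LEMMAS AND PROOFS =====
theorem pvAInner_eq (instr : List Int) (counter address : Int) :
    pvAInner instr counter address =
      if 0 ≤ address - counter ∧ address - counter < instr.length
      then some (address - counter).toNat else none := by
  induction instr generalizing counter with
  | nil => simp [pvAInner]
  | cons x rest ih =>
    simp only [pvAInner, ih (counter + 1), List.length_cons]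
    by_cases h : counter = address
    · subst h; simp
    · have hne : (counter == address) = false := by simp [h]
      rw [hne]
      simp only [Bool.false_eq_true, if_false]
      by_cases h1 : 0 ≤ address - (counter + 1) ∧ address - (counter + 1) < (rest.length : Int)
      · rw [if_pos h1, if_pos (by push_cast at h1 ⊢; omega)]
        simp [Option.map_some]
        omega
      · rw [if_neg h1, if_neg (by push_cast at h1 ⊢; omega)]
        simp

theorem pvAOuter_eq (lines : List (List Int)) (counter address value : Int) :
    pvAOuter lines counter address value =
      set_instruction_value_at_address_alt lines value (address - counter) := by
  induction lines generalizing counter with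
  | nil => simp [pvAOuter, set_instruction_value_at_address_alt]
  | cons l rest ih =>
    simp only [pvAOuter, set_instruction_value_at_address_alt, pvAInner_eq]
    by_cases h : 0 ≤ address - counter ∧ address - counter < (l.length : Int)
    · rw [if_pos h, if_pos h]
    · rw [if_neg h, if_neg h, ih,
        show address - (counter + (l.length : Int)) = address - counter - (l.length : Int) by ring]

-- ===== VERDICT (by name: the statement is the Claim_ definition above) =====
theorem set_instruction_value_at_address_spec : Claim_equal_set_instruction_value_at_address := by
  intro instructions value address _
  unfold Spec_set_instruction_value_at_address set_instruction_value_at_address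
  rw [pvAOuter_eq]
  norm_num
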